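-- pv_equiv track=rewrite | github.com/chamesh2019/CODING_CHALLENGES | 822 - Right Angled Triangle/main.py | right_triangle
-- ===== SOURCE A (Python) =====
-- def right_triangle(x: int, y: int, z: int) -> bool:
--     sides = [x, y, z]
--     if not all(side > 0 for side in sides):
--         return False
--
--     longest = max(sides)
--     sides.remove(longest)
--
--     if sides[0] ** 2 + sides[1] ** 2 == longest ** 2:
--         return True
--
--     return False
-- ===== SOURCE B (Python) =====
-- def right_triangle(x: int, y: int, z: int) -> bool:
--     if x <= 0 or y <= 0 or z <= 0:
--         return False
--     return x*x + y*y == z*z or y*y + z*z == x*x or x*x + z*z == y*y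
-- ===== Notes on version B (the rewrite author's own statement) =====
-- stated objective: simpler
-- what changed: Drops the list/max/remove mutation entirely: instead of isolating the longest side and testing one Pythagorean equation, B tests all three hypotenuse orientations directly; for positive sides the true orientation forces that side to be the strict maximum, so the results coincide.
import Mathlib
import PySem

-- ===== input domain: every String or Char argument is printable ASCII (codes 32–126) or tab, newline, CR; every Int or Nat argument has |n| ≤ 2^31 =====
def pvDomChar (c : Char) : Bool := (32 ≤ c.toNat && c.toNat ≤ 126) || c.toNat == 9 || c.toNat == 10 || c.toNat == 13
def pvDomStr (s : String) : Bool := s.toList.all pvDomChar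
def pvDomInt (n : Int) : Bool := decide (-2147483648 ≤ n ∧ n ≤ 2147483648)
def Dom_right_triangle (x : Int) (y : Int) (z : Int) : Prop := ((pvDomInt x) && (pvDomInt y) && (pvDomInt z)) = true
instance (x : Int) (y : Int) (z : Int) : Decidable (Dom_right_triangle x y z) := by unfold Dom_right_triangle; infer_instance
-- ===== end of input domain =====

-- B replaces A's list/max/remove isolation of the longest side by one boolean
-- testing all three hypotenuse orientations (objective: simpler).


-- ===== PORT A =====
def right_triangle (x : Int) (y : Int) (z : Int) : Bool :=
  let sides := [x, y, z]
  if !(sides.all (fun side => decide (side > 0))) then false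
  else
    match PySem.List.max? sides (fun s => s) with
    | none => false            -- unreachable: sides is nonempty
    | some longest =>
      match PySem.List.remove? sides longest with
      | none => false          -- unreachable: longest ∈ sides
      | some sides' =>
        match PySem.List.pyGet? sides' 0, PySem.List.pyGet? sides' 1 with
        | some a, some b => decide (a ^ 2 + b ^ 2 = longest ^ 2)
        | _, _ => false        -- unreachable: sides' has two elements

-- ===== PORT B =====
def right_triangle_alt (x : Int) (y : Int) (z : Int) : Bool :=
  if x ≤ 0 || y ≤ 0 || z ≤ 0 then false
  else decide (x * x + y * y = z * z) || decide (y * y + z * z = x * x) || decide (x * x + z * z = y * y)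

-- ===== PRECONDITION & SPEC =====
def Spec_right_triangle (x : Int) (y : Int) (z : Int) (out : Bool) : Prop := out = right_triangle_alt x y z
instance (x : Int) (y : Int) (z : Int) (out : Bool) : Decidable (Spec_right_triangle x y z out) := by unfold Spec_right_triangle; infer_instance

-- ===== CLAIM (what is proved, stated in full; the proofs are below) =====
def Claim_equal_right_triangle : Prop := ∀ (x : Int) (y : Int) (z : Int), Dom_right_triangle x y z → Spec_right_triangle x y z (right_triangle x y z)

-- ===== LEMMAS AND PROOFS =====

-- For positive sides, the orientation whose hypotenuse is a largest side is the only one that can hold.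
lemma keyX (x y z : Int) (hy : 0 < y) (hz : 0 < z) (hyx : y ≤ x) (hzx : z ≤ x) :
    (y ^ 2 + z ^ 2 = x ^ 2) ↔ (x * x + y * y = z * z ∨ y * y + z * z = x * x ∨ x * x + z * z = y * y) := by
  constructor
  · intro h; right; left; nlinarith
  · rintro (h | h | h) <;> nlinarith

lemma keyY (x y z : Int) (hx : 0 < x) (hz : 0 < z) (hxy : x ≤ y) (hzy : z ≤ y) :
    (x ^ 2 + z ^ 2 = y ^ 2) ↔ (x * x + y * y = z * z ∨ y * y + z * z = x * x ∨ x * x + z * z = y * y) := by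
  constructor
  · intro h; right; right; nlinarith
  · rintro (h | h | h) <;> nlinarith

lemma keyZ (x y z : Int) (hx : 0 < x) (hy : 0 < y) (hxz : x ≤ z) (hyz : y ≤ z) :
    (x ^ 2 + y ^ 2 = z ^ 2) ↔ (x * x + y * y = z * z ∨ y * y + z * z = x * x ∨ x * x + z * z = y * y) := by
  constructor
  · intro h; left; nlinarith
  · rintro (h | h | h) <;> nlinarith

-- ===== VERDICT (by name: the statement is the Claim_ definition above) =====
theorem right_triangle_spec : Claim_equal_right_triangle := by
  intro x y z _
  unfold Spec_right_triangle right_triangle right_triangle_alt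
  by_cases hp : 0 < x ∧ 0 < y ∧ 0 < z
  · obtain ⟨hx, hy, hz⟩ := hp
    simp only [List.all_cons, List.all_nil, PySem.List.max?_id_cons, List.foldl, Bool.and_true]
    rw [decide_eq_true hx, decide_eq_true hy, decide_eq_true hz]
    simp only [Bool.and_self, Bool.not_true, Bool.false_eq_true, if_false]
    rw [if_neg (by simp; omega)]
    set m := max (max x y) z with hm
    have hym : y ≤ m := le_trans (le_max_right x y) (le_max_left _ z)
    have hzm : z ≤ m := le_max_right _ z
    have hxm : x ≤ m := le_trans (le_max_left x y) (le_max_left _ z)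
    by_cases hxe : x = m
    · rw [show PySem.List.remove? [x, y, z] m = some [y, z] by rw [← hxe]; exact PySem.List.remove?_cons_self x [y, z]]
      dsimp only
      rw [show PySem.List.pyGet? [y, z] 0 = some y by simp [PySem.List.pyGet?, PySem.List.pyIdx?],
          show PySem.List.pyGet? [y, z] 1 = some z by simp [PySem.List.pyGet?, PySem.List.pyIdx?]]
      rw [← hxe, Bool.eq_iff_iff]
      simp only [decide_eq_true_eq, Bool.or_eq_true, or_assoc]
      exact keyX x y z hy hz (hxe ▸ hym) (hxe ▸ hzm)
    · by_cases hye : y = m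
      · rw [PySem.List.remove?_cons_of_ne [y, z] hxe,
            show PySem.List.remove? [y, z] m = some [z] by rw [← hye]; exact PySem.List.remove?_cons_self y [z]]
        simp only [Option.map_some]
        rw [show PySem.List.pyGet? [x, z] 0 = some x by simp [PySem.List.pyGet?, PySem.List.pyIdx?],
            show PySem.List.pyGet? [x, z] 1 = some z by simp [PySem.List.pyGet?, PySem.List.pyIdx?]]
        rw [← hye, Bool.eq_iff_iff]
        simp only [decide_eq_true_eq, Bool.or_eq_true, or_assoc]
        exact keyY x y z hx hz (hye ▸ hxm) (hye ▸ hzm)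
      · have hze : z = m := by
          rcases max_choice (max x y) z with h | h
          · rcases max_choice x y with h' | h' <;> rw [← hm] at h <;> omega
          · omega
        rw [PySem.List.remove?_cons_of_ne [y, z] hxe, PySem.List.remove?_cons_of_ne [z] hye,
            show PySem.List.remove? [z] m = some [] by rw [← hze]; exact PySem.List.remove?_cons_self z []]
        simp only [Option.map_some]
        rw [show PySem.List.pyGet? [x, y] 0 = some x by simp [PySem.List.pyGet?, PySem.List.pyIdx?],
            show PySem.List.pyGet? [x, y] 1 = some y by simp [PySem.List.pyGet?, PySem.List.pyIdx?]]
        rw [← hze, Bool.eq_iff_iff]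
        simp only [decide_eq_true_eq, Bool.or_eq_true, or_assoc]
        exact keyZ x y z hx hy (hze ▸ hxm) (hze ▸ hym)
  · have h1 : x ≤ 0 ∨ y ≤ 0 ∨ z ≤ 0 := by omega
    rcases h1 with h | h | h <;>
      simp [h]
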